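-- pv_equiv track=rewrite | github.com/shaperones/At_paper_Feb_2025 | insertions_assembler.py | extract_insertions
-- ===== SOURCE A (Python) =====
-- def extract_insertions(seq, cigar, ref_start):
--     insertion_seqs = []
--     ref_pos = ref_start
--     query_pos = 0
--
--     # Parse CIGAR string
--     for op, length in cigar:
--         if op == 0:  # Match (M) or equal (E) => reference position moves forward
--             ref_pos += length
--             query_pos += length
--         elif op == 1:  # Insertion (I) => insertion in the query sequence
--             insertion_seq = seq[query_pos:query_pos + length]  # Get insertion sequence from query
--             insertion_pos = ref_pos  # Insertion happens at the current reference position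
--             insertion_seqs.append((insertion_pos, insertion_seq))
--             query_pos += length
--         elif op == 2:  # Deletion (D) => no change in the query
--             ref_pos += length
--
--     return insertion_seqs
-- ===== SOURCE B (Python) =====
-- def extract_insertions(seq, cigar, ref_start):
--     # Pass 1: exclusive prefix offsets (ref consumed / query consumed BEFORE each op).
--     ref_offs = []
--     qry_offs = []
--     r = 0
--     q = 0
--     for op, length in cigar:
--         ref_offs.append(r)
--         qry_offs.append(q)
--         if op == 0 or op == 2:
--             r += length
--         if op == 0 or op == 1:
--             q += length
--     # Pass 2: emit one record per insertion op.
--     return [(ref_start + ref_offs[i], seq[qry_offs[i]:qry_offs[i] + length])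
--             for i, (op, length) in enumerate(cigar) if op == 1]
-- ===== Notes on version B (the rewrite author's own statement) =====
-- stated objective: alternative
-- what changed: Replaces the single accumulating scan that appends results as it goes with two passes: one pass builds exclusive ref/query prefix-offset arrays, then a comprehension over the enumerated CIGAR emits (ref_start + ref_offset, slice) for each insertion op.
import Mathlib
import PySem

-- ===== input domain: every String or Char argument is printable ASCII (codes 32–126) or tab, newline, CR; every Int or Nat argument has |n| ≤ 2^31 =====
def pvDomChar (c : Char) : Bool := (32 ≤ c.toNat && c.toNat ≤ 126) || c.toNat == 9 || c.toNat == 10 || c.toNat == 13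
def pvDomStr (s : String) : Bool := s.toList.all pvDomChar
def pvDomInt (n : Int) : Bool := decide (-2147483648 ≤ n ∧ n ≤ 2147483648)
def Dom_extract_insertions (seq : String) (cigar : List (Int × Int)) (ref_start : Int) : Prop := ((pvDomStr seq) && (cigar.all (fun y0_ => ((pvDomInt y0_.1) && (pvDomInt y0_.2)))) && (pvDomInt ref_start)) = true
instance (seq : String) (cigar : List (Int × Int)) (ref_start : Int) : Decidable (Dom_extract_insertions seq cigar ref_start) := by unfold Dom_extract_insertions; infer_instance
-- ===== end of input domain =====

-- B replaces A's single accumulating scan with two passes: exclusive prefix-offset arrays, then a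
-- filtered extraction over the enumerated CIGAR (alternative decomposition, same cost).


-- ===== PORT A =====
-- A: one scan carrying (insertion_seqs, ref_pos, query_pos); branches in the Python order.
def extract_insertions (seq : String) (cigar : List (Int × Int)) (ref_start : Int) : List (Int × String) :=
  (cigar.foldl (fun (st : List (Int × String) × Int × Int) p =>
      if p.1 = 0 then (st.1, st.2.1 + p.2, st.2.2 + p.2)
      else if p.1 = 1 then
        (st.1 ++ [(st.2.1, PySem.Str.slice seq (some st.2.2) (some (st.2.2 + p.2)))],
         st.2.1, st.2.2 + p.2)
      else if p.1 = 2 then (st.1, st.2.1 + p.2, st.2.2)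
      else st)
    ([], ref_start, 0)).1

-- ===== PORT B =====
-- B pass 1: exclusive prefix offsets (ref consumed / query consumed before each op).
def pvOffs (cigar : List (Int × Int)) : List Int × List Int :=
  let st := cigar.foldl (fun (st : List Int × List Int × Int × Int) p =>
      (st.1 ++ [st.2.2.1], st.2.1 ++ [st.2.2.2],
       st.2.2.1 + (if p.1 = 0 ∨ p.1 = 2 then p.2 else 0),
       st.2.2.2 + (if p.1 = 0 ∨ p.1 = 1 then p.2 else 0)))
    ([], [], 0, 0)
  (st.1, st.2.1)

-- B pass 2: per-index extraction of the insertion ops (zip = the comprehension's enumerate/index pairing).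
def extract_insertions_alt (seq : String) (cigar : List (Int × Int)) (ref_start : Int) : List (Int × String) :=
  let offs := pvOffs cigar
  (cigar.zip (offs.1.zip offs.2)).filterMap (fun x =>
    if x.1.1 = 1 then
      some (ref_start + x.2.1, PySem.Str.slice seq (some x.2.2) (some (x.2.2 + x.1.2)))
    else none)

-- ===== PRECONDITION & SPEC =====
def Spec_extract_insertions (seq : String) (cigar : List (Int × Int)) (ref_start : Int) (out : List (Int × String)) : Prop := out = extract_insertions_alt seq cigar ref_start
instance (seq : String) (cigar : List (Int × Int)) (ref_start : Int) (out : List (Int × String)) : Decidable (Spec_extract_insertions seq cigar ref_start out) := by unfold Spec_extract_insertions; infer_instance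

-- ===== CLAIM (what is proved, stated in full; the proofs are below) =====
def Claim_equal_extract_insertions : Prop := ∀ (seq : String) (cigar : List (Int × Int)) (ref_start : Int), Dom_extract_insertions seq cigar ref_start → Spec_extract_insertions seq cigar ref_start (extract_insertions seq cigar ref_start)

-- ===== LEMMAS AND PROOFS =====

-- Reference result of the whole computation, as a recursion (proof device only).
def pvCore (seq : String) (cigar : List (Int × Int)) (r q : Int) : List (Int × String) :=
  match cigar with
  | [] => []
  | p :: t =>
    if p.1 = 0 then pvCore seq t (r + p.2) (q + p.2)
    else if p.1 = 1 then
      (r, PySem.Str.slice seq (some q) (some (q + p.2))) :: pvCore seq t r (q + p.2)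
    else if p.1 = 2 then pvCore seq t (r + p.2) q
    else pvCore seq t r q

-- Exclusive prefix offsets, as a recursion (proof device only).
def pvOffsRec (cigar : List (Int × Int)) (r q : Int) : List (Int × Int) :=
  match cigar with
  | [] => []
  | p :: t =>
    (r, q) :: pvOffsRec t (r + (if p.1 = 0 ∨ p.1 = 2 then p.2 else 0))
                         (q + (if p.1 = 0 ∨ p.1 = 1 then p.2 else 0))

theorem pvA_loop (seq : String) (cigar : List (Int × Int)) (acc : List (Int × String)) (r q : Int) :
    (cigar.foldl (fun (st : List (Int × String) × Int × Int) p =>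
      if p.1 = 0 then (st.1, st.2.1 + p.2, st.2.2 + p.2)
      else if p.1 = 1 then
        (st.1 ++ [(st.2.1, PySem.Str.slice seq (some st.2.2) (some (st.2.2 + p.2)))],
         st.2.1, st.2.2 + p.2)
      else if p.1 = 2 then (st.1, st.2.1 + p.2, st.2.2)
      else st) (acc, r, q)).1 = acc ++ pvCore seq cigar r q := by
  induction cigar generalizing acc r q with
  | nil => simp [pvCore]
  | cons p t ih =>
    by_cases h0 : p.1 = 0 <;> by_cases h1 : p.1 = 1 <;> by_cases h2 : p.1 = 2 <;>
      simp [pvCore, h0, h1, h2, List.foldl_cons, ih]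

theorem pvB_offs (cigar : List (Int × Int)) (rs qs : List Int) (r q : Int) :
    (cigar.foldl (fun (st : List Int × List Int × Int × Int) p =>
      (st.1 ++ [st.2.2.1], st.2.1 ++ [st.2.2.2],
       st.2.2.1 + (if p.1 = 0 ∨ p.1 = 2 then p.2 else 0),
       st.2.2.2 + (if p.1 = 0 ∨ p.1 = 1 then p.2 else 0))) (rs, qs, r, q)) =
    (rs ++ (pvOffsRec cigar r q).map Prod.fst,
     qs ++ (pvOffsRec cigar r q).map Prod.snd,
     r + ((cigar.map (fun p => if p.1 = 0 ∨ p.1 = 2 then p.2 else 0)).sum),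
     q + ((cigar.map (fun p => if p.1 = 0 ∨ p.1 = 1 then p.2 else 0)).sum)) := by
  induction cigar generalizing rs qs r q with
  | nil => simp [pvOffsRec]
  | cons p t ih => simp [pvOffsRec, List.foldl_cons, ih]; constructor <;> ring

theorem pvB_extract (seq : String) (cigar : List (Int × Int)) (ref_start r q : Int) :
    (cigar.zip (pvOffsRec cigar r q)).filterMap (fun x =>
      if x.1.1 = 1 then
        some (ref_start + x.2.1, PySem.Str.slice seq (some x.2.2) (some (x.2.2 + x.1.2)))
      else none) = pvCore seq cigar (ref_start + r) q := by
  induction cigar generalizing r q with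
  | nil => simp [pvCore]
  | cons p t ih =>
    by_cases h0 : p.1 = 0 <;> by_cases h1 : p.1 = 1 <;> by_cases h2 : p.1 = 2 <;>
      simp [pvCore, pvOffsRec, h0, h1, h2, ih, add_assoc]

-- ===== VERDICT (by name: the statement is the Claim_ definition above) =====
theorem extract_insertions_spec : Claim_equal_extract_insertions := by
  intro seq cigar ref_start _
  show extract_insertions seq cigar ref_start = extract_insertions_alt seq cigar ref_start
  rw [extract_insertions, extract_insertions_alt, pvA_loop, pvOffs]
  simp only [pvB_offs, List.nil_append, List.zip_map', Prod.mk.eta]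
  have : (pvOffsRec cigar 0 0).map (fun a => (a.1, a.2)) = pvOffsRec cigar 0 0 := by simp
  rw [this, pvB_extract seq cigar ref_start 0 0, add_zero]
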